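-- pv_equiv track=rewrite | github.com/kol060k/Yandex_Algorithm_Training_2021 | HW7/C.py | share_variants
-- ===== SOURCE A (Python) =====
-- def share_variants(n, d, students):
--     # Будем решать задачу просто двумя указателями, находя максимальное количество студентов,
--     # которые могут находиться на отрезке [x, x+d] для всех x
--     # Дипломы раздадим на втором проходе просто по очереди: 1, 2, 3, 4, 1, 2, 3, 4, 1,...
--     # так точно будет правильно
--     students_sorted = sorted([(students[i], i) for i in range(n)])
--     variants_need = 0
--     R = 0
--     for L in range(n):
--         while R < n and (R == L or students_sorted[R][0] - students_sorted[L][0] <= d):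
--             R += 1
--         variants_need = max(variants_need, R - L)
--     ans = [0] * n
--     for i in range(n):
--         ans[students_sorted[i][1]] = i % variants_need + 1
--     return variants_need, ans
-- ===== SOURCE B (Python) =====
-- def _bisect_right(a, x, lo, hi):
--     # first index in [lo, hi] whose element exceeds x (a is sorted on [lo, hi))
--     while lo < hi:
--         mid = (lo + hi) // 2
--         if a[mid] <= x:
--             lo = mid + 1
--         else:
--             hi = mid
--     return lo
--
--
-- def share_variants(n, d, students):
--     pairs = sorted([(students[i], i) for i in range(n)])
--     values = [p[0] for p in pairs]
--     variants_need = 0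
--     for i in range(n):
--         j = _bisect_right(values, values[i] + d, i, n)
--         variants_need = max(variants_need, max(j, i + 1) - i)
--     ans = [0] * n
--     for pos, p in enumerate(pairs):
--         ans[p[1]] = pos % variants_need + 1
--     return variants_need, ans
-- ===== Notes on version B (the rewrite author's own statement) =====
-- stated objective: alternative
-- what changed: The monotonic two-pointer sweep that finds the largest window [x, x+d] is replaced by an independent hand-written binary search (bisect_right) per left index on the sorted values, with max(j, i+1) forcing each element to count itself; the assignment pass iterates enumerate(pairs) instead of an index loop.
import Mathlib
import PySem

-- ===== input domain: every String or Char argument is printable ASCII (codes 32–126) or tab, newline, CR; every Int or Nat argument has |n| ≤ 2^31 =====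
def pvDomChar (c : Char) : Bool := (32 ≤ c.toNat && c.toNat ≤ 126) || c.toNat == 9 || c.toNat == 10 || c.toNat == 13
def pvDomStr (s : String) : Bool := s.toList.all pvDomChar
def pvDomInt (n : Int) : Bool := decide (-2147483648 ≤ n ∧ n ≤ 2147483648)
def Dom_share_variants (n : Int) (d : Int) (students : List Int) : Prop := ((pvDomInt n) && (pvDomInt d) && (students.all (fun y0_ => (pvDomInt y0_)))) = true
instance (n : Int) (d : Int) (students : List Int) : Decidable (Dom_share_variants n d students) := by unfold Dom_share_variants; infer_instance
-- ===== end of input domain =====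

-- B replaces A's monotone two-pointer sweep by an independent binary search per left
-- index (objective: alternative algorithm of the same overall cost).

-- ===== PORT A =====

-- the inner 'while R < n and (R == L or vs[R][0] - vs[L][0] <= d): R += 1'
-- (fuel = n - R makes the recursion structural; it never runs out on the calls made)
def shareLoopA (fuel : Nat) (n : Int) (d : Int) (vs : List (Int × Int)) (L : Int) (R : Int) : Int :=
  match fuel with
  | 0 => R
  | fuel + 1 =>
    if R < n ∧ (R = L ∨ (PySem.List.pyGetD vs R (0, 0)).1 - (PySem.List.pyGetD vs L (0, 0)).1 ≤ d) then
      shareLoopA fuel n d vs L (R + 1)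
    else R

def share_variants (n : Int) (d : Int) (students : List Int) : Int × List Int :=
  let vs := PySem.List.sorted2 ((PySem.List.pyRange 0 n 1).map (fun i => (PySem.List.pyGetD students i 0, i))) Prod.fst Prod.snd
  let st := (PySem.List.pyRange 0 n 1).foldl
    (fun (s : Int × Int) L =>
      let R := shareLoopA (n - s.2).toNat n d vs L s.2
      (max s.1 (R - L), R)) (0, 0)
  let variants_need := st.1
  -- [0] * n : empty for n ≤ 0, hence the toNat
  let ans := (PySem.List.pyRange 0 n 1).foldl
    (fun ans i => PySem.List.pySetD ans (PySem.List.pyGetD vs i (0, 0)).2 (PySem.Int.mod i variants_need + 1))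
    (List.replicate n.toNat 0)
  (variants_need, ans)

-- ===== PORT B =====

-- hand-written _bisect_right of Source B: binary search for the first index in [lo, hi] whose element exceeds x
-- (fuel = hi - lo makes the recursion structural; it never runs out on the calls made)
def bisectR (fuel : Nat) (a : List Int) (x : Int) (lo : Int) (hi : Int) : Int :=
  match fuel with
  | 0 => lo
  | fuel + 1 =>
    if lo < hi then
      let mid := PySem.Int.floordiv (lo + hi) 2
      if PySem.List.pyGetD a mid 0 ≤ x then bisectR fuel a x (mid + 1) hi
      else bisectR fuel a x lo mid
    else lo

def share_variants_alt (n : Int) (d : Int) (students : List Int) : Int × List Int :=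
  let pairs := PySem.List.sorted2 ((PySem.List.pyRange 0 n 1).map (fun i => (PySem.List.pyGetD students i 0, i))) Prod.fst Prod.snd
  let values := pairs.map (fun p => p.1)
  let variants_need := (PySem.List.pyRange 0 n 1).foldl
    (fun v i =>
      let j := bisectR (n - i).toNat values (PySem.List.pyGetD values i 0 + d) i n
      max v (max j (i + 1) - i)) 0
  -- [0] * n : empty for n ≤ 0, hence the toNat
  let ans := (PySem.List.enumerate pairs).foldl
    (fun ans e => PySem.List.pySetD ans e.2.2 (PySem.Int.mod e.1 variants_need + 1))
    (List.replicate n.toNat 0)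
  (variants_need, ans)

-- ===== PRECONDITION & SPEC =====
-- A raises IndexError (students[i] in the comprehension) exactly when n > len(students);
-- every other input (n ≤ 0 included) returns normally.
def Pre_share_variants (n : Int) (d : Int) (students : List Int) : Prop := n ≤ students.length
instance (n : Int) (d : Int) (students : List Int) : Decidable (Pre_share_variants n d students) := by unfold Pre_share_variants; infer_instance
def pvWitness_share_variants : Int × Int × List Int := (3, 1, [5, 2, 3])

def Spec_share_variants (n : Int) (d : Int) (students : List Int) (out : Int × List Int) : Prop := out = share_variants_alt n d students
instance (n : Int) (d : Int) (students : List Int) (out : Int × List Int) : Decidable (Spec_share_variants n d students out) := by unfold Spec_share_variants; infer_instance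

-- ===== CLAIM (what is proved, stated in full; the proofs are below) =====
def Claim_equal_share_variants : Prop := ∀ (n : Int) (d : Int) (students : List Int), Dom_share_variants n d students → Pre_share_variants n d students → Spec_share_variants n d students (share_variants n d students)

-- ===== LEMMAS AND PROOFS =====

-- the sorted pair list has nondecreasing first components
theorem pvSortedFst (xs : List (Int × Int)) :
    ((PySem.List.sorted2 xs Prod.fst Prod.snd).map (fun p : Int × Int => p.1)).Pairwise (· ≤ ·) := by
  have hfun : (fun (a b : Int × Int) => (decide (a.1 < b.1) || (!decide (b.1 < a.1) && decide (a.2 < b.2))))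
      = fun a b => decide ((toLex a : Lex (Int × Int)) < toLex b) := by
    funext a b
    rcases lt_trichotomy a.1 b.1 with h | h | h
    · simp [Prod.Lex.lt_iff, h]
    · simp [Prod.Lex.lt_iff, h]
    · simp [Prod.Lex.lt_iff, h, lt_asymm h, ne_of_gt h]
  have hkey : PySem.List.sorted2 xs Prod.fst Prod.snd
      = PySem.List.sorted xs (fun p : Int × Int => (toLex p : Lex (Int × Int))) := by
    rw [PySem.List.sorted_eq_foldl_insertBy, ← hfun]
    rfl
  have hp := PySem.List.sorted_pairwise xs (fun p : Int × Int => (toLex p : Lex (Int × Int)))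
  rw [hkey]
  refine List.Pairwise.map _ (fun a b hab => ?_) hp
  rcases Prod.Lex.le_iff.mp hab with h | h
  · exact le_of_lt h
  · exact le_of_eq h.1

-- pyGetD through a map by fst
theorem pvGetFst (vs : List (Int × Int)) (i : Int) (h0 : 0 ≤ i) (h1 : i < (vs.length : Int)) :
    PySem.List.pyGetD (vs.map (fun p : Int × Int => p.1)) i 0 = (PySem.List.pyGetD vs i (0, 0)).1 := by
  rw [PySem.List.pyGetD_eq_getElem (vs.map (fun p : Int × Int => p.1)) 0 h0 (by simpa using h1),
    PySem.List.pyGetD_eq_getElem vs (0, 0) h0 h1]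
  simp

-- monotone access in a pairwise-≤ list
theorem pvMono (a : List Int) (ha : a.Pairwise (· ≤ ·)) (i j : Int) (h0 : 0 ≤ i) (hij : i ≤ j)
    (hj : j < (a.length : Int)) : PySem.List.pyGetD a i 0 ≤ PySem.List.pyGetD a j 0 := by
  rw [PySem.List.pyGetD_eq_getElem a 0 h0 (by omega), PySem.List.pyGetD_eq_getElem a 0 (by omega) hj]
  rcases eq_or_lt_of_le hij with h | h
  · simp [h]
  · exact List.pairwise_iff_getElem.mp ha i.toNat j.toNat (by omega) (by omega) (by omega)

-- monotone first components in the sorted pair list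
theorem pvMonoVs (n : Int) (vs : List (Int × Int))
    (ha : ((vs.map (fun p : Int × Int => p.1))).Pairwise (· ≤ ·)) (hn : n = (vs.length : Int))
    (i j : Int) (h0 : 0 ≤ i) (hij : i ≤ j) (hj : j < n) :
    (PySem.List.pyGetD vs i (0, 0)).1 ≤ (PySem.List.pyGetD vs j (0, 0)).1 := by
  rw [← pvGetFst vs i h0 (by omega), ← pvGetFst vs j (by omega) (by omega)]
  exact pvMono _ ha i j h0 hij (by simp; omega)

-- bounds for the binary-search midpoint
theorem pvBisectMid (lo hi : Int) (h : lo < hi) :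
    lo ≤ PySem.Int.floordiv (lo + hi) 2 ∧ PySem.Int.floordiv (lo + hi) 2 < hi := by
  unfold PySem.Int.floordiv; rw [Int.fdiv_eq_ediv]; omega

-- binary-search specification
theorem pvBisectSpec (a : List Int) (x : Int) (ha : a.Pairwise (· ≤ ·)) :
    ∀ (fuel : Nat) (lo hi : Int), (hi - lo).toNat ≤ fuel → 0 ≤ lo → lo ≤ hi → hi ≤ (a.length : Int) →
    lo ≤ bisectR fuel a x lo hi ∧ bisectR fuel a x lo hi ≤ hi ∧
    (∀ j : Int, lo ≤ j → j < bisectR fuel a x lo hi → PySem.List.pyGetD a j 0 ≤ x) ∧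
    (bisectR fuel a x lo hi < hi → x < PySem.List.pyGetD a (bisectR fuel a x lo hi) 0) := by
  intro fuel
  induction fuel with
  | zero =>
    intro lo hi hf h0 hlh hhi
    have hlo : ¬ lo < hi := by omega
    simp only [bisectR]
    exact ⟨le_refl _, hlh, fun j hj1 hj2 => absurd (lt_of_le_of_lt hj1 hj2) (lt_irrefl _),
      fun h => absurd h hlo⟩
  | succ f ih =>
    intro lo hi hf h0 hlh hhi
    simp only [bisectR]
    by_cases hlt : lo < hi
    · have hm := pvBisectMid lo hi hlt
      simp only [if_pos hlt]
      by_cases hle : PySem.List.pyGetD a (PySem.Int.floordiv (lo + hi) 2) 0 ≤ x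
      · rw [if_pos hle]
        obtain ⟨i1, i2, i3, i4⟩ := ih (PySem.Int.floordiv (lo + hi) 2 + 1) hi (by omega) (by omega) (by omega) hhi
        refine ⟨by omega, i2, ?_, i4⟩
        intro j hj1 hj2
        by_cases hjm : j ≤ PySem.Int.floordiv (lo + hi) 2
        · exact le_trans (pvMono a ha j _ (by omega) hjm (by omega)) hle
        · exact i3 j (by omega) hj2
      · rw [if_neg hle]
        obtain ⟨i1, i2, i3, i4⟩ := ih lo (PySem.Int.floordiv (lo + hi) 2) (by omega) h0 (by omega) (by omega)
        refine ⟨i1, by omega, i3, ?_⟩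
        intro _
        rcases eq_or_lt_of_le i2 with he | hlt3
        · rw [he]; exact not_le.mp hle
        · exact i4 hlt3
    · simp only [if_neg hlt]
      exact ⟨le_refl _, hlh, fun j hj1 hj2 => absurd (lt_of_le_of_lt hj1 hj2) (lt_irrefl _),
        fun h => absurd h hlt⟩

-- the while loop runs to the unique boundary m: its exit value is max R m
theorem pvWhileEq (n d : Int) (vs : List (Int × Int))
    (ha : ((vs.map (fun p : Int × Int => p.1))).Pairwise (· ≤ ·)) (hn : n = (vs.length : Int)) :
    ∀ (fuel : Nat) (L R m : Int), (n - R).toNat ≤ fuel → 0 ≤ L → L < n → L ≤ R → R ≤ n →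
    L + 1 ≤ m → m ≤ n →
    (∀ j : Int, L + 1 ≤ j → j < m → (PySem.List.pyGetD vs j (0, 0)).1 ≤ (PySem.List.pyGetD vs L (0, 0)).1 + d) →
    (m < n → (PySem.List.pyGetD vs L (0, 0)).1 + d < (PySem.List.pyGetD vs m (0, 0)).1) →
    shareLoopA fuel n d vs L R = max R m := by
  intro fuel
  induction fuel with
  | zero =>
    intro L R m hf h0 hLn hLR hRn hm1 hm2 hgood hbad
    simp only [shareLoopA]
    omega
  | succ f ih =>
    intro L R m hf h0 hLn hLR hRn hm1 hm2 hgood hbad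
    simp only [shareLoopA]
    by_cases hc : R < n ∧ (R = L ∨ (PySem.List.pyGetD vs R (0, 0)).1 - (PySem.List.pyGetD vs L (0, 0)).1 ≤ d)
    · simp only [if_pos hc]
      have hRm : R < m := by
        rcases hc.2 with he | hle
        · omega
        · by_contra hnot
          push_neg at hnot
          have h1 := hbad (by omega)
          have h2 := pvMonoVs n vs ha hn m R (by omega) (by omega) hc.1
          omega
      rw [ih L (R + 1) m (by omega) h0 hLn (by omega) (by omega) hm1 hm2 hgood hbad]
      omega
    · simp only [if_neg hc]
      by_cases hRn2 : R < n
      · have hor : ¬ (R = L ∨ (PySem.List.pyGetD vs R (0, 0)).1 - (PySem.List.pyGetD vs L (0, 0)).1 ≤ d) :=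
          fun horr => hc ⟨hRn2, horr⟩
        push_neg at hor
        have hmR : m ≤ R := by
          by_contra hnot
          push_neg at hnot
          have hgd := hgood R (by omega) hnot
          omega
        omega
      · omega

-- the boundary index computed by B (forced to be at least L+1)
def pvM (n d : Int) (vs : List (Int × Int)) (L : Int) : Int :=
  max (bisectR (n - L).toNat (vs.map (fun p : Int × Int => p.1))
      (PySem.List.pyGetD (vs.map (fun p : Int × Int => p.1)) L 0 + d) L n) (L + 1)

-- B's boundary satisfies the while-loop's exit conditions
theorem pvBoundary (n d : Int) (vs : List (Int × Int))
    (ha : ((vs.map (fun p : Int × Int => p.1))).Pairwise (· ≤ ·)) (hn : n = (vs.length : Int))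
    (L : Int) (h0 : 0 ≤ L) (hL : L < n) :
    L + 1 ≤ pvM n d vs L ∧ pvM n d vs L ≤ n ∧
    (∀ j : Int, L + 1 ≤ j → j < pvM n d vs L →
      (PySem.List.pyGetD vs j (0, 0)).1 ≤ (PySem.List.pyGetD vs L (0, 0)).1 + d) ∧
    (pvM n d vs L < n →
      (PySem.List.pyGetD vs L (0, 0)).1 + d < (PySem.List.pyGetD vs (pvM n d vs L) (0, 0)).1) := by
  have hlen : ((vs.map (fun p : Int × Int => p.1)).length : Int) = (vs.length : Int) := by simp
  obtain ⟨b1, b2, b3, b4⟩ := pvBisectSpec (vs.map (fun p : Int × Int => p.1))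
    (PySem.List.pyGetD (vs.map (fun p : Int × Int => p.1)) L 0 + d) ha (n - L).toNat L n
    (le_refl _) h0 (by omega) (by omega)
  have hMdef : pvM n d vs L = max (bisectR (n - L).toNat (vs.map (fun p : Int × Int => p.1))
      (PySem.List.pyGetD (vs.map (fun p : Int × Int => p.1)) L 0 + d) L n) (L + 1) := rfl
  refine ⟨by omega, by omega, ?_, ?_⟩
  · intro j hj1 hj2
    rw [← pvGetFst vs j (by omega) (by omega), ← pvGetFst vs L h0 (by omega)]
    exact b3 j (by omega) (by omega)
  · intro hmn
    rw [← pvGetFst vs (pvM n d vs L) (by omega) (by omega), ← pvGetFst vs L h0 (by omega)]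
    by_cases hr : L + 1 ≤ bisectR (n - L).toNat (vs.map (fun p : Int × Int => p.1))
        (PySem.List.pyGetD (vs.map (fun p : Int × Int => p.1)) L 0 + d) L n
    · have hM2 : pvM n d vs L = bisectR (n - L).toNat (vs.map (fun p : Int × Int => p.1))
          (PySem.List.pyGetD (vs.map (fun p : Int × Int => p.1)) L 0 + d) L n := by omega
      rw [hM2]
      exact b4 (by omega)
    · have hrL : bisectR (n - L).toNat (vs.map (fun p : Int × Int => p.1))
          (PySem.List.pyGetD (vs.map (fun p : Int × Int => p.1)) L 0 + d) L n = L := by omega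
      have hx := b4 (by omega)
      rw [hrL] at hx
      have hM2 : pvM n d vs L = L + 1 := by omega
      rw [hM2]
      have hmono := pvMono (vs.map (fun p : Int × Int => p.1)) ha L (L + 1) h0 (by omega) (by omega)
      omega

-- the two first-pass folds agree (carrying the pointer invariants)
theorem pvFold (n d : Int) (vs : List (Int × Int))
    (ha : ((vs.map (fun p : Int × Int => p.1))).Pairwise (· ≤ ·)) (hn : n = (vs.length : Int)) :
    ∀ (k : Nat), (k : Int) ≤ n →
    ((PySem.List.pyRange 0 (k : Int) 1).foldl
        (fun (s : Int × Int) L => (max s.1 (shareLoopA (n - s.2).toNat n d vs L s.2 - L), shareLoopA (n - s.2).toNat n d vs L s.2)) (0, 0)).1 =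
      (PySem.List.pyRange 0 (k : Int) 1).foldl
        (fun v i => max v (max (bisectR (n - i).toNat (vs.map (fun p : Int × Int => p.1))
          (PySem.List.pyGetD (vs.map (fun p : Int × Int => p.1)) i 0 + d) i n) (i + 1) - i)) 0 ∧
    (k : Int) ≤ ((PySem.List.pyRange 0 (k : Int) 1).foldl
        (fun (s : Int × Int) L => (max s.1 (shareLoopA (n - s.2).toNat n d vs L s.2 - L), shareLoopA (n - s.2).toNat n d vs L s.2)) (0, 0)).2 ∧
    ((PySem.List.pyRange 0 (k : Int) 1).foldl
        (fun (s : Int × Int) L => (max s.1 (shareLoopA (n - s.2).toNat n d vs L s.2 - L), shareLoopA (n - s.2).toNat n d vs L s.2)) (0, 0)).2 ≤ n ∧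
    ((PySem.List.pyRange 0 (k : Int) 1).foldl
        (fun (s : Int × Int) L => (max s.1 (shareLoopA (n - s.2).toNat n d vs L s.2 - L), shareLoopA (n - s.2).toNat n d vs L s.2)) (0, 0)).2 - (k : Int) ≤
      (PySem.List.pyRange 0 (k : Int) 1).foldl
        (fun v i => max v (max (bisectR (n - i).toNat (vs.map (fun p : Int × Int => p.1))
          (PySem.List.pyGetD (vs.map (fun p : Int × Int => p.1)) i 0 + d) i n) (i + 1) - i)) 0 := by
  intro k
  induction k with
  | zero =>
    intro h0n
    rw [show ((0 : Nat) : Int) = 0 by rfl, PySem.List.pyRange_one_eq_nil (le_refl 0)]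
    refine ⟨by simp, by simp, by simpa using h0n, by simp⟩
  | succ k ih =>
    intro hk1
    have hk : (k : Int) ≤ n := by push_cast at hk1 ⊢; omega
    obtain ⟨hv, hR1, hR2, hR3⟩ := ih hk
    have hk0 : (0 : Int) ≤ (k : Int) := by positivity
    have hsplit : PySem.List.pyRange 0 ((k + 1 : Nat) : Int) 1 = PySem.List.pyRange 0 (k : Int) 1 ++ [(k : Int)] := by
      push_cast
      exact PySem.List.pyRange_one_succ_right hk0
    rw [hsplit]
    simp only [List.foldl_append, List.foldl_cons, List.foldl_nil]
    obtain ⟨hm1, hm2, hgood, hbad⟩ := pvBoundary n d vs ha hn (k : Int) hk0 (by push_cast at hk1; omega)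
    have hw := pvWhileEq n d vs ha hn
      (n - ((PySem.List.pyRange 0 (k : Int) 1).foldl
        (fun (s : Int × Int) L => (max s.1 (shareLoopA (n - s.2).toNat n d vs L s.2 - L), shareLoopA (n - s.2).toNat n d vs L s.2)) (0, 0)).2).toNat
      (k : Int)
      ((PySem.List.pyRange 0 (k : Int) 1).foldl
        (fun (s : Int × Int) L => (max s.1 (shareLoopA (n - s.2).toNat n d vs L s.2 - L), shareLoopA (n - s.2).toNat n d vs L s.2)) (0, 0)).2
      (pvM n d vs (k : Int)) (le_refl _) hk0 (by push_cast at hk1; omega) hR1 hR2 hm1 hm2 hgood hbad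
    have hMdef : pvM n d vs (k : Int) = max (bisectR (n - (k : Int)).toNat (vs.map (fun p : Int × Int => p.1))
        (PySem.List.pyGetD (vs.map (fun p : Int × Int => p.1)) (k : Int) 0 + d) (k : Int) n) ((k : Int) + 1) := rfl
    rw [hMdef] at hw hm1 hm2
    rw [hw]
    push_cast
    rw [hv]
    refine ⟨by omega, by omega, by omega, by omega⟩

-- ===== VERDICT (by name: the statement is the Claim_ definition above) =====
theorem share_variants_spec : Claim_equal_share_variants := by
  intro n d students _ hPre
  unfold Spec_share_variants
  show share_variants n d students = share_variants_alt n d students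
  unfold share_variants share_variants_alt
  by_cases hn0 : n ≤ 0
  · rw [PySem.List.pyRange_one_eq_nil hn0]
    simp [PySem.List.sorted2]
  · push_neg at hn0
    have hlen : ((PySem.List.sorted2 ((PySem.List.pyRange 0 n 1).map
        (fun i => (PySem.List.pyGetD students i 0, i))) Prod.fst Prod.snd).length : Int) = n := by
      have hp := PySem.List.sorted2_perm ((PySem.List.pyRange 0 n 1).map
        (fun i => (PySem.List.pyGetD students i 0, i))) Prod.fst Prod.snd false
      rw [hp.length_eq]
      simp only [List.length_map, PySem.List.length_pyRange_one]
      omega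
    dsimp only
    set vs := PySem.List.sorted2 ((PySem.List.pyRange 0 n 1).map
      (fun i => (PySem.List.pyGetD students i 0, i))) Prod.fst Prod.snd with hvs
    have ha := pvSortedFst ((PySem.List.pyRange 0 n 1).map (fun i => (PySem.List.pyGetD students i 0, i)))
    rw [← hvs] at ha
    have hfold := pvFold n d vs ha hlen.symm n.toNat (by omega)
    have hcast : ((n.toNat : Int)) = n := Int.toNat_of_nonneg (by omega)
    rw [hcast] at hfold
    obtain ⟨hv, -, -, -⟩ := hfold
    rw [Prod.mk.injEq]
    refine ⟨hv, ?_⟩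
    rw [hv, PySem.List.enumerate_eq_map_pyRange vs (0, 0), List.foldl_map]
    have hlv : PySem.List.len vs = n := by
      simp only [PySem.List.len]
      exact hlen
    rw [hlv]
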